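-- pv_equiv track=rewrite | github.com/alperengozeten/CoT2 | data/generate_data.py | generate_text_dataset
-- ===== SOURCE A (Python) =====
-- import itertools
--
-- def generate_text_dataset(digit_range=range(1, 6), seq_length=4, mod=1):
--     """
--     For each 4-digit sequence in [1..5], we consider sign patterns of length 4,
--     starting from 0. That is:
--        partial_sum = 0 (+/-) seq[0] (+/-) seq[1] (+/-) seq[2] (+/-) seq[3].
--
--     Among all 16 possibilities, we pick the sign pattern whose final sum is
--     the smallest non-negative integer. If no sign pattern yields a non-negative
--     result, we skip that sequence.
--
--     We then record the digits and the *4* resulting partial sums in a line like: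
--        <BOS> D1 D1 D1 D4 -> S-1 S-2 S-3 S1 <EOS>
--     (omitting the initial S0 in the text).
--     """
--     dataset_text = []
--
--     for seq in itertools.product(digit_range, repeat=seq_length):
--         best_final_sum = None
--         best_partial_sums = None
--
--         # Try all sign patterns for the 4 digits (2^4 = 16),
--         # starting partial_sum = 0, then apply +/- for each digit in seq.
--         for signs in itertools.product(["+", "-"], repeat=seq_length):
--             partial_sum = 0
--             partial_sums = [partial_sum]  # [0, x, y, ...]
--
--             for i in range(seq_length):
--                 if signs[i] == "+":
--                     partial_sum += seq[i]
--                 else: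
--                     partial_sum -= seq[i]
--                 partial_sums.append(partial_sum)
--
--             # Check if final sum is >= 0
--             if partial_sum >= 0:
--                 # If this is the first non-negative final sum found
--                 # or if it's smaller than our current best
--                 if best_final_sum is None or partial_sum < best_final_sum:
--                     best_final_sum = partial_sum
--                     best_partial_sums = partial_sums
--
--         # If we found at least one sign pattern that yields a non-negative sum,
--         # record the best partial sums in textual form.
--         if best_final_sum is not None:
--             digit_seq_tokens = [f"D{d}" for d in seq]
--             # omit the initial partial sum (index 0) so only 4 sums remain
--             # best_partial_sums has length 5 => skip best_partial_sums[0]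
--             sum_seq_tokens = [f"S{ps}" for ps in best_partial_sums[1:]]
--
--             line_tokens = ["<BOS>"] + digit_seq_tokens + ["->"] + sum_seq_tokens + ["<EOS>"]
--             line_text = " ".join(line_tokens)
--             dataset_text.append(line_text)
--
--     new_dataset_text = []
--     for example in dataset_text:
--         tokens = example.split()
--         arrow_idx = tokens.index("->")
--         new_tokens = []
--         for i in range(arrow_idx):
--             new_tokens.append(tokens[i])
--         new_tokens.append("->")
--         for i in range(arrow_idx + 1, len(tokens) - 1):
--             # Include tokens if they match the mod pattern
--             # and always include the last partial-sum token.
--             if i % mod == ((len(tokens) - 2) % mod):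
--                 new_tokens.append(tokens[i])
--         new_tokens.append("<EOS>")
--         new_example = " ".join(new_tokens)
--         new_dataset_text.append(new_example)
--     dataset_text = new_dataset_text
--
--     return dataset_text
-- ===== SOURCE B (Python) =====
-- import itertools
--
-- def generate_text_dataset(digit_range=range(1, 6), seq_length=4, mod=1):
--     # Different algorithm: instead of recomputing the partial sums for every
--     # sign pattern, double up an array of all 2^n final sums (pattern order =
--     # last digit varies fastest, '+' before '-', matching the brute force),
--     # pick the first minimal non-negative final, and reconstruct the partial
--     # sums of that single winning pattern from its index.  Each line is
--     # emitted already filtered by the mod pattern -- no second re-split pass.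
--     out = []
--     n = seq_length
--     for seq in itertools.product(digit_range, repeat=n):
--         finals = [0]
--         for d in seq:
--             finals = [x for f in finals for x in (f + d, f - d)]
--         best = None   # (final_sum, index of winning pattern)
--         for m, f in enumerate(finals):
--             if f >= 0 and (best is None or f < best[0]):
--                 best = (f, m)
--         if best is None:
--             continue
--         # bit (n-1-i) of the index is 0 for '+', 1 for '-'; accumulate once.
--         sums = list(itertools.accumulate(
--             d if (best[1] >> (n - 1 - i)) & 1 == 0 else -d
--             for i, d in enumerate(seq)))
--         # token index of S_k in the full line is n+1+k; the last one, 2n+1,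
--         # always satisfies the congruence, so it is always kept.
--         kept = ["S%d" % s for k, s in enumerate(sums, start=1)
--                 if (n + 1 + k) % mod == (2 * n + 1) % mod]
--         out.append(" ".join(["<BOS>"] + ["D%d" % d for d in seq] + ["->"]
--                             + kept + ["<EOS>"]))
--     return out
-- ===== Notes on version B (the rewrite author's own statement) =====
-- stated objective: alternative
-- what changed: Instead of recomputing all partial sums for each of the 2^n sign-string patterns and then serializing each line and re-splitting it in a second pass, B doubles up an array of all 2^n final sums digit by digit, scans it once for the first minimal non-negative entry, reconstructs the partial sums only for the single winning pattern from its bitmask index, and emits each line already mod-filtered in one pass.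
import Mathlib
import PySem

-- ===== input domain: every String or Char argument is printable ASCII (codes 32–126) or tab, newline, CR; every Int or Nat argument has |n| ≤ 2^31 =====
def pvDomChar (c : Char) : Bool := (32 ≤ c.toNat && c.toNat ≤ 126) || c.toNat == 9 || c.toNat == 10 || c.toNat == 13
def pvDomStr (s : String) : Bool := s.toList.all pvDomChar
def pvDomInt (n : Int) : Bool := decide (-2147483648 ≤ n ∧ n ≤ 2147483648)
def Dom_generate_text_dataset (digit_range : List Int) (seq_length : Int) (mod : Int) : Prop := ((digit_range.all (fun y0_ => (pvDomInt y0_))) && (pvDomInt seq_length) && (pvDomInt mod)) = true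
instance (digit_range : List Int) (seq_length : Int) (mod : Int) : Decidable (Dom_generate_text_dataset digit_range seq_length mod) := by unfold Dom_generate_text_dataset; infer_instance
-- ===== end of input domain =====

-- B replaces the per-pattern partial-sum recomputation and the serialize/re-split
-- second pass by a doubling array of all 2^n final sums, a single argmin scan,
-- one reconstruction of the winner's partial sums, and direct mod-filtered output.

-- ===== PORT A =====

-- itertools.product(l, repeat=n) (used by both Pythons; leftmost position varies slowest)
def pyProduct {α : Type} (l : List α) : Nat → List (List α)
  | 0 => [[]]
  | Nat.succ k => l.flatMap (fun x => (pyProduct l k).map (fun t => x :: t))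

-- the inner 'for i in range(seq_length)' loop: one sign pattern's (final, partial_sums)
def pvSignStep (seq : List Int) (signs : List String) (n : Nat) : Int × List Int :=
  (PySem.List.pyRange 0 (n : Int) 1).foldl
    (fun st i =>
      let ps := if PySem.List.pyGetD signs i "" = "+" then st.1 + PySem.List.pyGetD seq i 0
                else st.1 - PySem.List.pyGetD seq i 0
      (ps, st.2 ++ [ps]))
    (0, [(0 : Int)])

-- the 'for signs in itertools.product(["+","-"], repeat=seq_length)' loop with
-- best_final_sum / best_partial_sums tracking (None = none)
def pvBestA (seq : List Int) (n : Nat) : Option (Int × List Int) :=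
  (pyProduct ["+", "-"] n).foldl
    (fun best signs =>
      let r := pvSignStep seq signs n
      if 0 ≤ r.1 then
        match best with
        | none => some r
        | some b => if r.1 < b.1 then some r else some b
      else best)
    none

-- f"D{d}" / f"S{ps}" are 'D' resp. 'S' followed by str(·)'s characters (exact)
def pvLineA (seq : List Int) (plist : List Int) : String :=
  PySem.Str.join " "
    (["<BOS>"] ++ seq.map (fun d => String.ofList ('D' :: PySem.Int.toChars d)) ++ ["->"]
      ++ (PySem.List.slice plist (some 1) none).map (fun ps => String.ofList ('S' :: PySem.Int.toChars ps))
      ++ ["<EOS>"])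

-- the second pass over one example; '->' is always present in the lines built
-- above, so tokens.index('->') never raises and .getD 0 is never taken
def pvTransformA (mod : Int) (ex : String) : String :=
  let tokens := PySem.Str.split₀ ex
  let arrow_idx : Nat := (PySem.List.index? tokens "->").getD 0
  let new1 := (PySem.List.pyRange 0 (arrow_idx : Int) 1).foldl
      (fun acc i => acc ++ [PySem.List.pyGetD tokens i ""]) []
  let new2 := new1 ++ ["->"]
  let L : Int := PySem.List.len tokens
  let new3 := (PySem.List.pyRange ((arrow_idx : Int) + 1) (L - 1) 1).foldl
      (fun acc i => if PySem.Int.mod i mod = PySem.Int.mod (L - 2) mod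
                    then acc ++ [PySem.List.pyGetD tokens i ""] else acc) new2
  PySem.Str.join " " (new3 ++ ["<EOS>"])

-- Pre_ below requires 0 ≤ seq_length (Python raises ValueError on a negative repeat),
-- so seq_length.toNat is exact
def generate_text_dataset (digit_range : List Int) (seq_length : Int) (mod : Int) : List String :=
  let dataset_text := (pyProduct digit_range seq_length.toNat).filterMap (fun seq =>
    match pvBestA seq seq_length.toNat with
    | none => none
    | some b => some (pvLineA seq b.2))
  dataset_text.map (pvTransformA mod)

-- ===== PORT B =====

-- 'for d in seq: finals = [x for f in finals for x in (f + d, f - d)]'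
def pvFinals (seq : List Int) : List Int :=
  seq.foldl (fun finals d => finals.flatMap (fun f => [f + d, f - d])) [(0 : Int)]

-- 'for m, f in enumerate(finals): if f >= 0 and (best is None or f < best[0]) ...'
def pvBestB (finals : List Int) : Option (Int × Int) :=
  (PySem.List.enumerate finals 0).foldl
    (fun (best : Option (Int × Int)) (mf : Int × Int) =>
      if (decide (0 ≤ mf.2) && (match best with | none => true | some b => decide (mf.2 < b.1)))
      then some (mf.2, mf.1) else best)
    none

-- itertools.accumulate with running sum
def pvAccumulate (acc : Int) : List Int → List Int
  | [] => []
  | x :: t => (acc + x) :: pvAccumulate (acc + x) t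

-- (m >> k) & 1, exact for the only uses here: m a non-negative list index and
-- 0 ≤ k (k = n-1-i with 0 ≤ i < n from enumerate(seq))
def pvBit (m : Int) (k : Int) : Int := ((m.toNat >>> k.toNat) % 2 : Nat)

def generate_text_dataset_alt (digit_range : List Int) (seq_length : Int) (mod : Int) : List String :=
  -- n = seq_length; 0 ≤ seq_length under Pre_ (B also raises on a negative shift count)
  let n : Nat := seq_length.toNat
  (pyProduct digit_range n).filterMap (fun seq =>
    let finals := pvFinals seq
    match pvBestB finals with
    | none => none
    | some best =>
      let sums := pvAccumulate 0 ((PySem.List.enumerate seq 0).map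
        (fun idp => if pvBit best.2 ((n : Int) - 1 - idp.1) = 0 then idp.2 else -idp.2))
      let kept := ((PySem.List.enumerate sums 1).filter
          (fun ks => PySem.Int.mod ((n : Int) + 1 + ks.1) mod == PySem.Int.mod (2 * (n : Int) + 1) mod)).map
        (fun ks => String.ofList ('S' :: PySem.Int.toChars ks.2))
      some (PySem.Str.join " "
        (["<BOS>"] ++ seq.map (fun d => String.ofList ('D' :: PySem.Int.toChars d)) ++ ["->"]
          ++ kept ++ ["<EOS>"])))

-- ===== PRECONDITION & SPEC =====

-- Pre_ excludes exactly the inputs where the Python A raises: a negative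
-- seq_length (ValueError from repeat<0) and mod = 0 whenever at least one line
-- with partial-sum tokens is produced (ZeroDivisionError from '% mod'); a line
-- is produced for every sequence, so that is whenever digit_range ≠ [] and
-- seq_length > 0.
def Pre_generate_text_dataset (digit_range : List Int) (seq_length : Int) (mod : Int) : Prop :=
  0 ≤ seq_length ∧ (mod ≠ 0 ∨ seq_length = 0 ∨ digit_range = [])
instance (digit_range : List Int) (seq_length : Int) (mod : Int) : Decidable (Pre_generate_text_dataset digit_range seq_length mod) := by
  unfold Pre_generate_text_dataset; infer_instance

def pvWitness_generate_text_dataset : List Int × Int × Int := ([1, 2], 2, 2)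

def Spec_generate_text_dataset (digit_range : List Int) (seq_length : Int) (mod : Int) (out : List String) : Prop := out = generate_text_dataset_alt digit_range seq_length mod
instance (digit_range : List Int) (seq_length : Int) (mod : Int) (out : List String) : Decidable (Spec_generate_text_dataset digit_range seq_length mod out) := by unfold Spec_generate_text_dataset; infer_instance

-- ===== CLAIM (what is proved, stated in full; the proofs are below) =====
def Claim_equal_generate_text_dataset : Prop := ∀ (digit_range : List Int) (seq_length : Int) (mod : Int), Dom_generate_text_dataset digit_range seq_length mod → Pre_generate_text_dataset digit_range seq_length mod → Spec_generate_text_dataset digit_range seq_length mod (generate_text_dataset digit_range seq_length mod)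

-- ===== LEMMAS AND PROOFS =====

-- ---------- arithmetic/bit helpers ----------

-- the signed digit list of sign-pattern index m (bit n-1-i: 0 = '+', 1 = '-')
def pvSgnd (n m : Nat) (seq : List Int) : List Int :=
  (List.range n).map (fun i => if (m >>> (n - 1 - i)) % 2 = 0 then seq.getD i 0 else -seq.getD i 0)

-- the sign-string pattern of index m, in itertools.product(["+","-"]) order
def pvMaskSigns (n m : Nat) : List String :=
  (List.range n).map (fun i => if (m >>> (n - 1 - i)) % 2 = 0 then "+" else "-")

theorem pvAccumulate_foldl (xs : List Int) : ∀ (a : Int) (acc : List Int),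
    xs.foldl (fun (st : Int × List Int) x => (st.1 + x, st.2 ++ [st.1 + x])) (a, acc)
      = (a + xs.sum, acc ++ pvAccumulate a xs) := by
  induction xs with
  | nil => intro a acc; simp [pvAccumulate]
  | cons x t ih =>
    intro a acc
    simp only [List.foldl_cons, pvAccumulate, ih, List.sum_cons]
    simp [add_assoc]

theorem pvAccumulate_length (xs : List Int) : ∀ a, (pvAccumulate a xs).length = xs.length := by
  induction xs with
  | nil => intro a; rfl
  | cons x t ih => intro a; simp [pvAccumulate, ih]

theorem pvSgnd_length (n m : Nat) (seq : List Int) : (pvSgnd n m seq).length = n := by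
  simp [pvSgnd]

theorem pyProduct_length {α : Type} (l : List α) : ∀ (n : Nat), ∀ t ∈ pyProduct l n, t.length = n := by
  intro n
  induction n with
  | zero => intro t ht; simp [pyProduct] at ht; simp [ht]
  | succ k ih =>
    intro t ht
    simp only [pyProduct, List.mem_flatMap, List.mem_map] at ht
    obtain ⟨x, _, t', ht', rfl⟩ := ht
    simp [ih t' ht']

theorem pvSignStep_eq (seq : List Int) (n m : Nat) (hlen : seq.length = n) :
    pvSignStep seq (pvMaskSigns n m) n
      = ((pvSgnd n m seq).sum, 0 :: pvAccumulate 0 (pvSgnd n m seq)) := by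
  unfold pvSignStep
  rw [PySem.List.pyRange_one]
  have h0 : ((n : Int) - 0).toNat = n := by omega
  rw [h0, List.foldl_map]
  have hrepr : pvSgnd n m seq = (List.range n).map (fun k => (pvSgnd n m seq).getD k 0) := by
    apply List.ext_getElem
    · simp [pvSgnd]
    · intro k h1 h2
      simp only [List.getElem_map, List.getElem_range]
      exact (List.getD_eq_getElem _ _ h1).symm
  have hcong := PySem.List.foldl_congr_mem
    (l := List.range n)
    (f := fun (st : Int × List Int) k =>
      let ps := if PySem.List.pyGetD (pvMaskSigns n m) (0 + (k : Int)) "" = "+"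
                then st.1 + PySem.List.pyGetD seq (0 + (k : Int)) 0
                else st.1 - PySem.List.pyGetD seq (0 + (k : Int)) 0
      (ps, st.2 ++ [ps]))
    (g := fun (st : Int × List Int) k =>
      (st.1 + (pvSgnd n m seq).getD k 0, st.2 ++ [st.1 + (pvSgnd n m seq).getD k 0]))
    (init := ((0 : Int), [(0 : Int)]))
  rw [hcong]
  · conv_lhs => rw [show (List.range n).foldl
        (fun (st : Int × List Int) k =>
          (st.1 + (pvSgnd n m seq).getD k 0, st.2 ++ [st.1 + (pvSgnd n m seq).getD k 0]))
        ((0 : Int), [(0 : Int)])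
        = (pvSgnd n m seq).foldl
            (fun (st : Int × List Int) x => (st.1 + x, st.2 ++ [st.1 + x])) ((0 : Int), [(0 : Int)])
      from by conv_rhs => rw [hrepr, List.foldl_map]]
    rw [pvAccumulate_foldl]
    simp
  · intro st k hk
    rw [List.mem_range] at hk
    simp only [zero_add, PySem.List.pyGetD_natCast]
    have hmask : (pvMaskSigns n m).getD k ""
        = (if (m >>> (n - 1 - k)) % 2 = 0 then "+" else "-") := by
      unfold pvMaskSigns
      exact PySem.List.getD_map_range _ _ _ _ hk
    have hsg : (pvSgnd n m seq).getD k 0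
        = (if (m >>> (n - 1 - k)) % 2 = 0 then seq.getD k 0 else -seq.getD k 0) := by
      unfold pvSgnd
      exact PySem.List.getD_map_range _ _ _ _ hk
    rw [hmask, hsg]
    by_cases hb : (m >>> (n - 1 - k)) % 2 = 0
    · simp [hb]
    · rw [if_neg hb, if_neg hb]
      simp [sub_eq_add_neg]

theorem pvMaskSigns_succ (k m : Nat) :
    pvMaskSigns (k + 1) m = (if (m >>> k) % 2 = 0 then "+" else "-") :: pvMaskSigns k m := by
  unfold pvMaskSigns
  rw [List.range_succ_eq_map]
  simp only [List.map_cons, List.map_map, Nat.sub_zero, Nat.add_sub_cancel]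
  congr 1
  apply List.map_congr_left
  intro i _
  simp only [Function.comp_apply, Nat.succ_eq_add_one]
  have h : k - (i + 1) = k - 1 - i := by omega
  rw [h]

theorem shift_add_pow (k j m : Nat) (hj : j < k) :
    ((2 ^ k + m) >>> j) % 2 = (m >>> j) % 2 := by
  have h1 : (2 : Nat) ^ k = 2 ^ (k - j - 1) * 2 * 2 ^ j := by
    rw [mul_assoc, ← pow_succ']
    rw [← pow_add]
    congr 1
    omega
  rw [Nat.shiftRight_eq_div_pow, Nat.shiftRight_eq_div_pow, h1]
  rw [add_comm, Nat.add_mul_div_right _ _ (Nat.two_pow_pos j)]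
  rw [Nat.add_mul_mod_self_right]

theorem pvMaskSigns_add_pow (k m : Nat) : pvMaskSigns k (2 ^ k + m) = pvMaskSigns k m := by
  unfold pvMaskSigns
  apply List.map_congr_left
  intro i hi
  rw [List.mem_range] at hi
  rw [shift_add_pow k (k - 1 - i) m (by omega)]

theorem pyProduct_signs : ∀ (n : Nat), pyProduct ["+", "-"] n = (List.range (2 ^ n)).map (pvMaskSigns n) := by
  intro n
  induction n with
  | zero => simp [pyProduct, pvMaskSigns]
  | succ k ih =>
    have h2 : (2 : Nat) ^ (k + 1) = 2 ^ k + 2 ^ k := by rw [pow_succ]; omega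
    rw [h2, List.range_add]
    simp only [pyProduct, ih, List.flatMap_cons, List.flatMap_nil, List.map_map,
      List.map_append, List.append_nil]
    congr 1
    · apply List.map_congr_left
      intro m hm
      rw [List.mem_range] at hm
      simp only [Function.comp_apply]
      rw [pvMaskSigns_succ]
      have : (m >>> k) % 2 = 0 := by
        rw [Nat.shiftRight_eq_div_pow, Nat.div_eq_of_lt hm]
      rw [if_pos this]
    · apply List.map_congr_left
      intro m hm
      rw [List.mem_range] at hm
      simp only [Function.comp_apply]
      rw [pvMaskSigns_succ, pvMaskSigns_add_pow]
      have : ((2 ^ k + m) >>> k) % 2 = 1 := by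
        rw [Nat.shiftRight_eq_div_pow, add_comm,
          Nat.add_div_right _ (Nat.two_pow_pos k),
          Nat.div_eq_of_lt hm]
      rw [if_neg (by omega)]

theorem doubling (F : Nat → Int) (d : Int) : ∀ (N : Nat),
    ((List.range N).map F).flatMap (fun f => [f + d, f - d])
      = (List.range (2 * N)).map (fun m => F (m / 2) + (if m % 2 = 0 then d else -d)) := by
  intro N
  induction N with
  | zero => simp
  | succ k ih =>
    rw [List.range_succ, List.map_append, List.flatMap_append, ih]
    have h2 : 2 * (k + 1) = 2 * k + 2 := by omega
    rw [h2, List.range_add, List.map_append]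
    congr 1
    simp only [List.map_cons, List.flatMap_cons, List.flatMap_nil, List.map_nil,
      List.append_nil]
    rw [show List.range 2 = [0, 1] from rfl]
    simp only [List.map_cons, List.map_nil]
    rw [Nat.mul_add_div (by norm_num), Nat.mul_add_div (by norm_num)]
    norm_num
    simp [sub_eq_add_neg]

theorem pvSgnd_snoc (k m : Nat) (s : List Int) (d : Int) (hs : s.length = k) :
    pvSgnd (k + 1) m (s ++ [d]) = pvSgnd k (m / 2) s ++ [if m % 2 = 0 then d else -d] := by
  unfold pvSgnd
  rw [List.range_succ, List.map_append]
  congr 1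
  · apply List.map_congr_left
    intro i hi
    rw [List.mem_range] at hi
    have h1 : k + 1 - 1 - i = (k - 1 - i) + 1 := by omega
    rw [h1]
    have h2 : m >>> (k - 1 - i + 1) = (m / 2) >>> (k - 1 - i) := by
      rw [Nat.add_comm, Nat.shiftRight_add, Nat.shiftRight_one]
    rw [h2]
    have h3 : (s ++ [d]).getD i 0 = s.getD i 0 := by
      rw [List.getD_eq_getElem _ _ (by simp; omega), List.getD_eq_getElem _ _ (by omega),
        List.getElem_append_left (by omega)]
    rw [h3]
  · simp only [List.map_cons, List.map_nil]
    have h4 : (s ++ [d]).getD k 0 = d := by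
      rw [List.getD_eq_getElem _ _ (by simp; omega)]
      rw [List.getElem_append_right (by omega)]
      simp [hs]
    rw [h4]
    simp

theorem pvFinals_eq (seq : List Int) :
    pvFinals seq = (List.range (2 ^ seq.length)).map (fun m => (pvSgnd seq.length m seq).sum) := by
  induction seq using List.reverseRecOn with
  | nil => simp [pvFinals, pvSgnd]
  | append_singleton s d ih =>
    have hstep : pvFinals (s ++ [d]) = (pvFinals s).flatMap (fun f => [f + d, f - d]) := by
      unfold pvFinals
      rw [List.foldl_append]
      rfl
    rw [hstep, ih, doubling]
    have hl : (s ++ [d]).length = s.length + 1 := by simp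
    rw [hl]
    have h2 : (2 : Nat) ^ (s.length + 1) = 2 * 2 ^ s.length := by rw [pow_succ]; omega
    rw [h2]
    apply List.map_congr_left
    intro m hm
    rw [List.mem_range] at hm
    rw [pvSgnd_snoc _ _ _ _ rfl, List.sum_append]
    simp

theorem enum_eq {α : Type} (d : α) : ∀ (xs : List α) (s : Int),
    PySem.List.enumerate xs s = (List.range xs.length).map (fun (k : Nat) => (s + (k : Int), xs.getD k d)) := by
  intro xs
  induction xs with
  | nil => intro s; simp [PySem.List.enumerate]
  | cons x t ih =>
    intro s
    simp only [PySem.List.enumerate, List.length_cons, List.range_succ_eq_map,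
      List.map_cons, List.map_map]
    congr 1
    · simp
    · rw [ih (s + 1)]
      apply List.map_congr_left
      intro k _
      simp only [Function.comp_apply, Nat.succ_eq_add_one, List.getD_cons_succ]
      congr 1
      push_cast
      ring

theorem bestA_eq (seq : List Int) (n : Nat) (hlen : seq.length = n) :
    pvBestA seq n = (List.range (2 ^ n)).foldl
      (fun (best : Option (Int × List Int)) m =>
        let r := ((pvSgnd n m seq).sum, 0 :: pvAccumulate 0 (pvSgnd n m seq))
        if 0 ≤ r.1 then
          match best with
          | none => some r
          | some b => if r.1 < b.1 then some r else some b
        else best) none := by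
  unfold pvBestA
  rw [pyProduct_signs, List.foldl_map]
  apply PySem.List.foldl_congr_mem
  intro acc m hm
  rw [pvSignStep_eq seq n m hlen]

theorem bestB_eq (seq : List Int) (n : Nat) (hlen : seq.length = n) :
    pvBestB (pvFinals seq) = (List.range (2 ^ n)).foldl
      (fun (b : Option (Int × Int)) m =>
        if (decide (0 ≤ (pvSgnd n m seq).sum)
            && (match b with | none => true | some p => decide ((pvSgnd n m seq).sum < p.1)))
        then some ((pvSgnd n m seq).sum, (m : Int)) else b) none := by
  unfold pvBestB
  rw [pvFinals_eq, hlen, enum_eq 0, List.length_map, List.length_range, List.foldl_map]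
  apply PySem.List.foldl_congr_mem
  intro acc m hm
  rw [List.mem_range] at hm
  rw [PySem.List.getD_map_range _ _ _ _ hm]
  simp

theorem bestSim (seq : List Int) (n : Nat) : ∀ (l : List Nat)
    (a : Option (Int × List Int)) (b : Option (Int × Int)),
    ((a = none ∧ b = none) ∨
      ∃ v m, a = some (v, 0 :: pvAccumulate 0 (pvSgnd n m seq)) ∧ b = some (v, (m : Int))) →
    ((l.foldl (fun (best : Option (Int × List Int)) m =>
        let r := ((pvSgnd n m seq).sum, 0 :: pvAccumulate 0 (pvSgnd n m seq))
        if 0 ≤ r.1 then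
          match best with
          | none => some r
          | some b => if r.1 < b.1 then some r else some b
        else best) a = none ∧
      l.foldl (fun (b : Option (Int × Int)) m =>
        if (decide (0 ≤ (pvSgnd n m seq).sum)
            && (match b with | none => true | some p => decide ((pvSgnd n m seq).sum < p.1)))
        then some ((pvSgnd n m seq).sum, (m : Int)) else b) b = none) ∨
      ∃ v m, l.foldl (fun (best : Option (Int × List Int)) m =>
        let r := ((pvSgnd n m seq).sum, 0 :: pvAccumulate 0 (pvSgnd n m seq))
        if 0 ≤ r.1 then
          match best with
          | none => some r
          | some b => if r.1 < b.1 then some r else some b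
        else best) a = some (v, 0 :: pvAccumulate 0 (pvSgnd n m seq)) ∧
      l.foldl (fun (b : Option (Int × Int)) m =>
        if (decide (0 ≤ (pvSgnd n m seq).sum)
            && (match b with | none => true | some p => decide ((pvSgnd n m seq).sum < p.1)))
        then some ((pvSgnd n m seq).sum, (m : Int)) else b) b = some (v, (m : Int))) := by
  intro l
  induction l with
  | nil => intro a b h; simpa using h
  | cons m0 t ih =>
    intro a b h
    simp only [List.foldl_cons]
    apply ih
    rcases h with ⟨ha, hb⟩ | ⟨v, m, ha, hb⟩
    · subst ha; subst hb
      by_cases h0 : 0 ≤ (pvSgnd n m0 seq).sum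
      · right
        refine ⟨(pvSgnd n m0 seq).sum, m0, ?_, ?_⟩ <;> simp [h0]
      · left
        constructor <;> simp [h0]
    · subst ha; subst hb
      by_cases h0 : 0 ≤ (pvSgnd n m0 seq).sum
      · by_cases h1 : (pvSgnd n m0 seq).sum < v
        · right
          refine ⟨(pvSgnd n m0 seq).sum, m0, ?_, ?_⟩ <;> simp [h0, h1]
        · right
          refine ⟨v, m, ?_, ?_⟩ <;> simp [h0, h1]
      · right
        refine ⟨v, m, ?_, ?_⟩ <;> simp [h0]

theorem best_rel (seq : List Int) (n : Nat) (hlen : seq.length = n) :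
    (pvBestA seq n = none ∧ pvBestB (pvFinals seq) = none) ∨
      ∃ v m, pvBestA seq n = some (v, 0 :: pvAccumulate 0 (pvSgnd n m seq)) ∧
        pvBestB (pvFinals seq) = some (v, (m : Int)) := by
  rw [bestA_eq seq n hlen, bestB_eq seq n hlen]
  exact bestSim seq n (List.range (2 ^ n)) none none (Or.inl ⟨rfl, rfl⟩)

-- ---------- string-level lemmas ----------

theorem isspace_false_of (c : Char) (h1 : 33 ≤ c.toNat) (h2 : c.toNat ≤ 126) :
    PySem.Chars.isspace c = false := by
  simp only [PySem.Chars.isspace]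
  simp only [Bool.or_eq_false_iff, Bool.and_eq_false_iff, decide_eq_false_iff_not]
  omega

theorem digitChar_bounds (k : Nat) : 33 ≤ (Nat.digitChar k).toNat ∧ (Nat.digitChar k).toNat ≤ 126 := by
  by_cases h0 : k = 0; · subst h0; decide
  by_cases h1 : k = 1; · subst h1; decide
  by_cases h2 : k = 2; · subst h2; decide
  by_cases h3 : k = 3; · subst h3; decide
  by_cases h4 : k = 4; · subst h4; decide
  by_cases h5 : k = 5; · subst h5; decide
  by_cases h6 : k = 6; · subst h6; decide
  by_cases h7 : k = 7; · subst h7; decide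
  by_cases h8 : k = 8; · subst h8; decide
  by_cases h9 : k = 9; · subst h9; decide
  by_cases ha : k = 10; · subst ha; decide
  by_cases hb : k = 11; · subst hb; decide
  by_cases hc : k = 12; · subst hc; decide
  by_cases hd : k = 13; · subst hd; decide
  by_cases he : k = 14; · subst he; decide
  by_cases hf : k = 15; · subst hf; decide
  have hstar : Nat.digitChar k = '*' := by
    unfold Nat.digitChar
    simp [h0, h1, h2, h3, h4, h5, h6, h7, h8, h9, ha, hb, hc, hd, he, hf]
  rw [hstar]; decide

theorem toDigitsCore_mem (b : Nat) : ∀ (fuel n : Nat) (ds : List Char),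
    ∀ c ∈ Nat.toDigitsCore b fuel n ds, c ∈ ds ∨ ∃ k, c = Nat.digitChar k := by
  intro fuel
  induction fuel with
  | zero => intro n ds c hc; exact Or.inl hc
  | succ f ih =>
    intro n ds c hc
    simp only [Nat.toDigitsCore] at hc
    split at hc
    · rcases List.mem_cons.mp hc with h | h
      · exact Or.inr ⟨n % b, h⟩
      · exact Or.inl h
    · rcases ih _ _ c hc with h | h
      · rcases List.mem_cons.mp h with h' | h'
        · exact Or.inr ⟨n % b, h'⟩
        · exact Or.inl h'
      · exact Or.inr h

theorem toChars_nonspace (d : Int) : ∀ c ∈ PySem.Int.toChars d, PySem.Chars.isspace c = false := by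
  intro c hc
  unfold PySem.Int.toChars at hc
  have hdig : ∀ k, PySem.Chars.isspace (Nat.digitChar k) = false := fun k =>
    isspace_false_of _ (digitChar_bounds k).1 (digitChar_bounds k).2
  split at hc
  · rcases List.mem_cons.mp hc with h | h
    · subst h; decide
    · rcases toDigitsCore_mem 10 _ _ _ c h with h' | ⟨k, rfl⟩
      · simp at h'
      · exact hdig k
  · rcases toDigitsCore_mem 10 _ _ _ c hc with h' | ⟨k, rfl⟩
    · simp at h'
    · exact hdig k

theorem splitgo_word : ∀ (w : List Char), (∀ c ∈ w, PySem.Chars.isspace c = false) →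
    ∀ (rest cur : List Char) (acc : List (List Char)),
    PySem.Chars.split₀.go (w ++ rest) cur acc = PySem.Chars.split₀.go rest (w.reverse ++ cur) acc := by
  intro w
  induction w with
  | nil => intro _ rest cur acc; simp
  | cons c w' ih =>
    intro h rest cur acc
    have hc : PySem.Chars.isspace c = false := h c (List.mem_cons_self)
    simp only [List.cons_append, PySem.Chars.split₀.go, hc, Bool.false_eq_true, if_false]
    rw [ih (fun x hx => h x (List.mem_cons_of_mem _ hx))]
    simp

theorem intercalate_cons_cons (sep : List Char) (w w2 : List Char) (ws2 : List (List Char)) :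
    List.intercalate sep (w :: w2 :: ws2) = w ++ sep ++ List.intercalate sep (w2 :: ws2) := by
  simp [List.intercalate, List.intersperse]

theorem splitgo_join : ∀ (ws : List (List Char)),
    (∀ w ∈ ws, w ≠ [] ∧ ∀ c ∈ w, PySem.Chars.isspace c = false) →
    ∀ (acc : List (List Char)),
    PySem.Chars.split₀.go (List.intercalate [' '] ws) [] acc = acc.reverse ++ ws := by
  intro ws
  induction ws with
  | nil => intro _ acc; simp [List.intercalate, PySem.Chars.split₀.go]
  | cons w ws ih =>
    intro h acc
    obtain ⟨hne, hsp⟩ := h w (List.mem_cons_self)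
    cases ws with
    | nil =>
      have : List.intercalate [' '] [w] = w := by simp [List.intercalate]
      rw [this, show w = w ++ [] from by simp, splitgo_word w hsp]
      have hrev : (w.reverse ++ []).isEmpty = false := by
        simp [List.isEmpty_iff, hne]
      simp only [PySem.Chars.split₀.go, hrev, Bool.false_eq_true, if_false]
      simp
    | cons w2 ws2 =>
      rw [intercalate_cons_cons]
      rw [List.append_assoc, splitgo_word w hsp]
      have hrev : (w.reverse ++ []).isEmpty = false := by
        simp [List.isEmpty_iff, hne]
      simp only [List.singleton_append, PySem.Chars.split₀.go, hrev, Bool.false_eq_true,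
        if_false, show PySem.Chars.isspace ' ' = true from by decide, if_true]
      rw [ih (fun x hx => h x (List.mem_cons_of_mem _ hx))]
      simp

theorem split_join (ws : List String)
    (h : ∀ w ∈ ws, w.toList ≠ [] ∧ ∀ c ∈ w.toList, PySem.Chars.isspace c = false) :
    PySem.Str.split₀ (PySem.Str.join " " ws) = ws := by
  unfold PySem.Str.split₀ PySem.Str.join PySem.Chars.join PySem.Chars.split₀
  rw [String.toList_ofList]
  rw [show (" " : String).toList = [' '] from by decide]
  rw [splitgo_join (ws.map String.toList)
    (by intro w hw; rw [List.mem_map] at hw; obtain ⟨x, hx, rfl⟩ := hw; exact h x hx) []]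
  simp only [List.reverse_nil, List.nil_append, List.map_map]
  have : List.map (String.ofList ∘ String.toList) ws = List.map id ws :=
    List.map_congr_left (fun w _ => String.ofList_toList)
  rw [this, List.map_id]

def pvDtok (d : Int) : String := String.ofList ('D' :: PySem.Int.toChars d)
def pvStok (v : Int) : String := String.ofList ('S' :: PySem.Int.toChars v)

-- the partial-sum tokens that survive the mod filter (token index of S_k is n+1+k)
def pvKept (n : Nat) (sums : List Int) (mod : Int) : List String :=
  ((List.range n).filter (fun (k : Nat) =>
      PySem.Int.mod ((n : Int) + 2 + (k : Int)) mod == PySem.Int.mod (2 * (n : Int) + 1) mod)).map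
    (fun (k : Nat) => pvStok (sums.getD k 0))

theorem Dtok_ok (d : Int) : (pvDtok d).toList ≠ [] ∧
    ∀ c ∈ (pvDtok d).toList, PySem.Chars.isspace c = false := by
  unfold pvDtok
  rw [String.toList_ofList]
  refine ⟨by simp, ?_⟩
  intro c hc
  rcases List.mem_cons.mp hc with h | h
  · subst h; decide
  · exact toChars_nonspace d c h

theorem Stok_ok (v : Int) : (pvStok v).toList ≠ [] ∧
    ∀ c ∈ (pvStok v).toList, PySem.Chars.isspace c = false := by
  unfold pvStok
  rw [String.toList_ofList]
  refine ⟨by simp, ?_⟩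
  intro c hc
  rcases List.mem_cons.mp hc with h | h
  · subst h; decide
  · exact toChars_nonspace v c h

theorem Dtok_ne_arrow (d : Int) : pvDtok d ≠ "->" := by
  intro h
  have := congrArg String.toList h
  rw [show pvDtok d = String.ofList ('D' :: PySem.Int.toChars d) from rfl,
    String.toList_ofList, show ("->" : String).toList = ['-', '>'] from by decide] at this
  have h2 := congrArg (fun l => l.head?) this
  simp at h2

theorem map_getD_range_append {α : Type} (P Q : List α) (d : α) :
    (List.range P.length).map (fun k => (P ++ Q).getD k d) = P := by
  apply List.ext_getElem
  · simp
  · intro k h1 h2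
    simp only [List.getElem_map, List.getElem_range]
    rw [List.getD_eq_getElem _ _ (by simp; omega), List.getElem_append_left]

theorem getD_append_right' {α : Type} (P Q : List α) (k : Nat) (d : α) :
    (P ++ Q).getD (P.length + k) d = Q.getD k d := by
  by_cases h : k < Q.length
  · rw [List.getD_eq_getElem _ _ (by simp; omega), List.getD_eq_getElem _ _ h,
      List.getElem_append_right (by omega)]
    congr 1
    omega
  · rw [List.getD_eq_default _ _ (by simp; omega), List.getD_eq_default _ _ (by omega)]

theorem first_loop (T2 : List String) (n : Nat) :
    List.foldl (fun acc i => acc ++ [PySem.List.pyGetD T2 i ""]) []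
      (PySem.List.pyRange 0 ((n : Int)))
      = (List.range n).map (fun k => T2.getD k "") := by
  rw [PySem.List.foldl_append_singleton_eq_map, List.nil_append, PySem.List.pyRange_one]
  have h : ((n : Int) - 0).toNat = n := by omega
  rw [h, List.map_map]
  apply List.map_congr_left
  intro k _
  simp

theorem filter_loop (T2 : List String) (mod c : Int) (acc : List String) (a b : Int) :
    List.foldl (fun acc i =>
        if PySem.Int.mod i mod = PySem.Int.mod c mod
        then acc ++ [PySem.List.pyGetD T2 i ""] else acc) acc (PySem.List.pyRange a b)
      = acc ++ ((List.range (b - a).toNat).filter (fun (k : Nat) =>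
          decide (PySem.Int.mod (a + (k : Int)) mod = PySem.Int.mod c mod))).map
        (fun (k : Nat) => PySem.List.pyGetD T2 (a + (k : Int)) "") := by
  rw [PySem.List.foldl_append_ite, PySem.List.pyRange_one, List.filter_map, List.map_map]
  rfl

theorem allns (l : List Char) (h : (l.all (fun c => !PySem.Chars.isspace c)) = true) :
    ∀ c ∈ l, PySem.Chars.isspace c = false := by
  intro c hc
  have := List.all_eq_true.mp h c hc
  simpa using this

theorem transform_line (seq sums : List Int) (mod : Int) (hs : sums.length = seq.length) :
    pvTransformA mod (pvLineA seq (0 :: sums)) =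
      PySem.Str.join " " (["<BOS>"] ++ seq.map pvDtok ++ ["->"]
        ++ pvKept seq.length sums mod ++ ["<EOS>"]) := by
  have hline : pvLineA seq (0 :: sums) =
      PySem.Str.join " " (["<BOS>"] ++ seq.map pvDtok ++ ["->"] ++ sums.map pvStok ++ ["<EOS>"]) := by
    unfold pvLineA
    rw [PySem.List.slice_from_one]
    rfl
  set T : List String :=
    ["<BOS>"] ++ seq.map pvDtok ++ ["->"] ++ sums.map pvStok ++ ["<EOS>"] with hT
  have htok : ∀ w ∈ T, w.toList ≠ [] ∧ ∀ c ∈ w.toList, PySem.Chars.isspace c = false := by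
    intro w hw
    rw [hT] at hw
    simp only [List.append_assoc, List.mem_append, List.mem_singleton, List.mem_map,
      List.mem_cons, List.not_mem_nil, or_false] at hw
    rcases hw with h | ⟨d, _, rfl⟩ | h | ⟨v, _, rfl⟩ | h
    · subst h
      refine ⟨by decide, ?_⟩
      rw [show ("<BOS>" : String).toList = ['<', 'B', 'O', 'S', '>'] from by decide]
      exact allns _ (by rfl)
    · exact Dtok_ok d
    · subst h
      refine ⟨by decide, ?_⟩
      rw [show ("->" : String).toList = ['-', '>'] from by decide]
      exact allns _ (by rfl)
    · exact Stok_ok v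
    · subst h
      refine ⟨by decide, ?_⟩
      rw [show ("<EOS>" : String).toList = ['<', 'E', 'O', 'S', '>'] from by decide]
      exact allns _ (by rfl)
  have hsplit : PySem.Str.split₀ (pvLineA seq (0 :: sums)) = T := by
    rw [hline, split_join T htok]
  have harrow : PySem.List.index? T "->" = some (seq.length + 1) := by
    rw [PySem.List.index?_eq_some_iff]
    refine ⟨"<BOS>" :: seq.map pvDtok, sums.map pvStok ++ ["<EOS>"], ?_, by simp, ?_⟩
    · rw [hT]; simp
    · intro hmem
      rcases List.mem_cons.mp hmem with h | h
      · exact absurd h.symm (by decide)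
      · rw [List.mem_map] at h
        obtain ⟨d, _, hd⟩ := h
        exact Dtok_ne_arrow d hd
  unfold pvTransformA
  simp only [hsplit, harrow, Option.getD_some, PySem.List.len_eq]
  have hTlen : T.length = 2 * seq.length + 3 := by rw [hT]; simp [hs]; omega
  rw [hTlen]
  congr 1
  rw [first_loop, filter_loop]
  have hsplitT : T = ("<BOS>" :: seq.map pvDtok) ++ (["->"] ++ sums.map pvStok ++ ["<EOS>"]) := by
    rw [hT]; simp
  have hfirst : (List.range (seq.length + 1)).map (fun k => T.getD k "")
      = "<BOS>" :: seq.map pvDtok := by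
    conv_lhs => rw [hsplitT, show seq.length + 1 = ("<BOS>" :: seq.map pvDtok).length from by simp]
    exact map_getD_range_append _ _ _
  rw [hfirst]
  have hcnt : ((((2 * seq.length + 3 : Nat) : Int) - 1) - (((seq.length + 1 : Nat) : Int) + 1)).toNat
      = seq.length := by push_cast; omega
  rw [hcnt]
  have hmid : ((List.range seq.length).filter (fun (k : Nat) =>
        decide (PySem.Int.mod (((seq.length + 1 : Nat) : Int) + 1 + (k : Int)) mod
          = PySem.Int.mod (((2 * seq.length + 3 : Nat) : Int) - 2) mod))).map
      (fun (k : Nat) => PySem.List.pyGetD T (((seq.length + 1 : Nat) : Int) + 1 + (k : Int)) "")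
      = pvKept seq.length sums mod := by
    unfold pvKept
    rw [List.filter_congr (q := fun (k : Nat) =>
        PySem.Int.mod ((seq.length : Int) + 2 + (k : Int)) mod
          == PySem.Int.mod (2 * (seq.length : Int) + 1) mod) ?_]
    · apply List.map_congr_left
      intro k hk
      rw [List.mem_filter, List.mem_range] at hk
      obtain ⟨hk, _⟩ := hk
      have hidx : ((seq.length + 1 : Nat) : Int) + 1 + (k : Int) = ((seq.length + 2 + k : Nat) : Int) := by
        push_cast; ring
      rw [hidx, PySem.List.pyGetD_natCast, hsplitT]
      have hP2 : ("<BOS>" :: seq.map pvDtok) ++ (["->"] ++ sums.map pvStok ++ ["<EOS>"])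
          = (("<BOS>" :: seq.map pvDtok) ++ ["->"]) ++ (sums.map pvStok ++ ["<EOS>"]) := by simp
      rw [hP2]
      have hlenP2 : seq.length + 2 + k = (("<BOS>" :: seq.map pvDtok) ++ ["->"]).length + k := by
        simp
      rw [hlenP2, getD_append_right']
      have hk' : k < sums.length := by omega
      rw [List.getD_eq_getElem _ _ (by simp [hs]; omega), List.getD_eq_getElem _ _ hk']
      rw [List.getElem_append_left (by simp; omega)]
      simp
    · intro k hk
      rw [List.mem_range] at hk
      have hidx : ((seq.length + 1 : Nat) : Int) + 1 + (k : Int) = (seq.length : Int) + 2 + (k : Int) := by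
        push_cast; ring
      have hL2 : ((2 * seq.length + 3 : Nat) : Int) - 2 = 2 * (seq.length : Int) + 1 := by
        push_cast; ring
      rw [hidx, hL2]
      by_cases h : PySem.Int.mod ((seq.length : Int) + 2 + (k : Int)) mod
          = PySem.Int.mod (2 * (seq.length : Int) + 1) mod <;> simp [h]
  rw [hmid]
  simp

theorem signedB_eq (seq : List Int) (n m : Nat) (hlen : seq.length = n) :
    (PySem.List.enumerate seq 0).map
        (fun idp => if pvBit ((m : Nat) : Int) ((n : Int) - 1 - idp.1) = 0 then idp.2 else -idp.2)
      = pvSgnd n m seq := by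
  rw [enum_eq 0 seq 0, List.map_map, hlen]
  unfold pvSgnd
  apply List.map_congr_left
  intro k hk
  rw [List.mem_range] at hk
  simp only [Function.comp_apply, zero_add]
  have hbit : pvBit ((m : Nat) : Int) ((n : Int) - 1 - (k : Int)) = ((m >>> (n - 1 - k)) % 2 : Nat) := by
    unfold pvBit
    have h1 : (((m : Nat) : Int)).toNat = m := Int.toNat_natCast m
    have h2 : (((n : Nat) : Int) - 1 - ((k : Nat) : Int)).toNat = n - 1 - k := by omega
    rw [h1, h2]
  rw [hbit]
  by_cases hb : (m >>> (n - 1 - k)) % 2 = 0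
  · simp [hb]
  · rw [if_neg (by exact_mod_cast hb), if_neg hb]

theorem keptB_eq (sums : List Int) (n : Nat) (M : Int) (hlen : sums.length = n) :
    ((PySem.List.enumerate sums 1).filter
        (fun ks => PySem.Int.mod ((n : Int) + 1 + ks.1) M == PySem.Int.mod (2 * (n : Int) + 1) M)).map
      (fun ks => String.ofList ('S' :: PySem.Int.toChars ks.2))
      = pvKept n sums M := by
  rw [enum_eq 0 sums 1, hlen, List.filter_map, List.map_map]
  unfold pvKept
  rw [List.filter_congr (q := fun (k : Nat) =>
      PySem.Int.mod ((n : Int) + 2 + (k : Int)) M == PySem.Int.mod (2 * (n : Int) + 1) M) ?_]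
  · apply List.map_congr_left
    intro k hk
    rfl
  · intro k _
    simp only [Function.comp_apply]
    have h : ((n : Int) + 1 + (1 + (k : Int))) = ((n : Int) + 2 + (k : Int)) := by ring
    rw [h]

-- ===== VERDICT (by name: the statement is the Claim_ definition above) =====
set_option maxHeartbeats 2000000 in
theorem generate_text_dataset_spec : Claim_equal_generate_text_dataset := by
  intro digit_range seq_length mod _ _
  unfold Spec_generate_text_dataset generate_text_dataset generate_text_dataset_alt
  rw [List.map_filterMap]
  apply List.filterMap_congr
  intro seq hseq
  have hlen := pyProduct_length digit_range seq_length.toNat seq hseq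
  rcases best_rel seq seq_length.toNat hlen with ⟨ha, hb⟩ | ⟨v, m, ha, hb⟩
  · simp [ha, hb]
  · simp only [ha, hb, Option.map_some]
    rw [signedB_eq seq seq_length.toNat m hlen]
    refine congrArg some ?_
    rw [transform_line seq (pvAccumulate 0 (pvSgnd seq_length.toNat m seq)) mod
      (by rw [pvAccumulate_length, pvSgnd_length, hlen]),
      keptB_eq (pvAccumulate 0 (pvSgnd seq_length.toNat m seq)) seq_length.toNat mod
        (by rw [pvAccumulate_length, pvSgnd_length]),
      hlen]
    rfl
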